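-- pv_equiv track=rewrite | github.com/yei-pi/image-processing-unit2 | pure_python_filters.py | _pad_image_zero
-- ===== SOURCE A (Python) =====
-- def _pad_image_zero(image, pad=1):
--     """
--     Agrega padding de ceros alrededor de la imagen.
--
--     Parámetros:
--         image (list[list[int]]): imagen como lista de listas
--         pad (int): grosor del padding
--
--     Retorna:
--         list[list[int]]: imagen con padding
--     """
--     h = len(image)
--     w = len(image[0])
--
--     padded = [[0 for _ in range(w + 2 * pad)] for _ in range(h + 2 * pad)]
--
--     for i in range(h):
--         for j in range(w):
--             padded[i + pad][j + pad] = int(image[i][j])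
--
--     return padded
-- ===== SOURCE B (Python) =====
-- def _pad_image_zero(image, pad=1):
--     w = len(image[0])
--     width = w + 2 * pad
--     top = [[0] * width for _ in range(pad)]
--     bottom = [[0] * width for _ in range(pad)]
--     body = [[0] * pad + [int(x) for x in row[:w]] + [0] * pad for row in image]
--     return top + body + bottom
-- ===== Notes on version B (the rewrite author's own statement) =====
-- stated objective: simpler
-- what changed: B builds the padded image directly by bulk list construction (pad zero rows, then each row as zero-prefix + row values + zero-suffix, then pad zero rows) instead of allocating a zero matrix and overwriting its interior with per-cell nested index assignments.
-- outside the precondition, e.g. on _pad_image_zero([[], []], -1): A returns [], B returns [[], []]; on _pad_image_zero([[], [], []], -1): A returns [[]], B returns [[], [], []]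
import Mathlib
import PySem

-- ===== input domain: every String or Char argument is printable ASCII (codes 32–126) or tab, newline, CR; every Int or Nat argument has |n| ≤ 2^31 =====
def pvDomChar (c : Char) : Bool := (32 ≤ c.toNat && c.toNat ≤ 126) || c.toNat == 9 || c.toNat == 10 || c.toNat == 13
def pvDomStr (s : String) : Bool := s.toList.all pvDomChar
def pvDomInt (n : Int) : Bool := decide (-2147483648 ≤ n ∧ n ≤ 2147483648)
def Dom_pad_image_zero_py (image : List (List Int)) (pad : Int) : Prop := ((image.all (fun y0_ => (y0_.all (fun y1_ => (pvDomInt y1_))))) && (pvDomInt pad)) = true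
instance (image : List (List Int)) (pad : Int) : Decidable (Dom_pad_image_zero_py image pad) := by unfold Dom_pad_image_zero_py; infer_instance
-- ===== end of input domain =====

-- B builds the padded image directly by row construction (zero rows, then each row as
-- zero-prefix ++ row ++ zero-suffix) instead of allocating a zero matrix and overwriting
-- its interior; equivalence of the return values is proved on Pre_.

-- ===== PORT A =====
-- Python item assignment xs[i] = v (negative index counts from the end; out of range would
-- raise IndexError — under Pre_ every assignment is in range, the identity fallback is unreachable).
def pySet {α : Type} (xs : List α) (i : Int) (v : α) : List α :=
  let k : Int := if i < 0 then i + xs.length else i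
  if 0 ≤ k ∧ k < xs.length then xs.set k.toNat v else xs

def pad_image_zero_py (image : List (List Int)) (pad : Int) : List (List Int) :=
  let h : Int := image.length
  -- len(image[0]): Python raises IndexError on an empty image; Pre_ excludes it (0 is a placeholder)
  let w : Int :=
    match PySem.List.pyGet? image 0 with
    | some r => r.length
    | none => 0
  let padded : List (List Int) :=
    (PySem.List.pyRange 0 (h + 2 * pad) 1).map (fun _ =>
      (PySem.List.pyRange 0 (w + 2 * pad) 1).map (fun _ => (0 : Int)))
  (PySem.List.pyRange 0 h 1).foldl (fun m i =>
    (PySem.List.pyRange 0 w 1).foldl (fun m' j =>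
      -- padded[i + pad][j + pad] = int(image[i][j]); reads in range under Pre_, .getD 0 unreachable
      match PySem.List.pyGet? m' (i + pad) with
      | some row =>
          pySet m' (i + pad)
            (pySet row (j + pad)
              (((PySem.List.pyGet? image i).bind (fun r => PySem.List.pyGet? r j)).getD 0))
      | none => m') m) padded

-- ===== PORT B =====
def pad_image_zero_py_alt (image : List (List Int)) (pad : Int) : List (List Int) :=
  match PySem.List.pyGet? image 0 with
  | none => []   -- Python raises IndexError on an empty image; excluded by Pre_
  | some r0 =>
    let w : Int := r0.length
    let width : Int := w + 2 * pad
    let top := (PySem.List.pyRange 0 pad 1).map (fun _ => PySem.List.pyRepeat [(0 : Int)] width)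
    let bottom := (PySem.List.pyRange 0 pad 1).map (fun _ => PySem.List.pyRepeat [(0 : Int)] width)
    let body := image.map (fun row =>
      PySem.List.pyRepeat [(0 : Int)] pad
        ++ (PySem.List.slice row none (some w)).map (fun x => x)
        ++ PySem.List.pyRepeat [(0 : Int)] pad)
    top ++ (body ++ bottom)

-- ===== PRECONDITION & SPEC =====
-- Pre_ excludes exactly the inputs where A raises IndexError (empty image, a row shorter
-- than the first row, negative pad with nonempty rows) together with the remaining
-- negative-pad inputs (all rows empty), where A's h + 2*pad row count is an accident of its
-- allocation: a negative padding thickness is outside the function's natural domain.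
def Pre_pad_image_zero_py (image : List (List Int)) (pad : Int) : Prop :=
  image ≠ [] ∧ 0 ≤ pad ∧ ∀ row ∈ image, (image.headI).length ≤ row.length
instance (image : List (List Int)) (pad : Int) : Decidable (Pre_pad_image_zero_py image pad) := by unfold Pre_pad_image_zero_py; infer_instance

def pvWitness_pad_image_zero_py : List (List Int) × Int := ([[1, 2], [3, 4]], 1)

def Spec_pad_image_zero_py (image : List (List Int)) (pad : Int) (out : List (List Int)) : Prop := out = pad_image_zero_py_alt image pad
instance (image : List (List Int)) (pad : Int) (out : List (List Int)) : Decidable (Spec_pad_image_zero_py image pad out) := by unfold Spec_pad_image_zero_py; infer_instance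

-- ===== CLAIM (what is proved, stated in full; the proofs are below) =====
def Claim_equal_pad_image_zero_py : Prop := ∀ (image : List (List Int)) (pad : Int), Dom_pad_image_zero_py image pad → Pre_pad_image_zero_py image pad → Spec_pad_image_zero_py image pad (pad_image_zero_py image pad)

-- ===== LEMMAS AND PROOFS =====

theorem pySet_natCast {α : Type} (xs : List α) (k : ℕ) (v : α) (hk : k < xs.length) :
    pySet xs (k : Int) v = xs.set k v := by
  simp only [pySet]
  split_ifs with h1 h2 <;> simp_all <;> omega

theorem set_append_cons {α : Type} (A : List α) (x : α) (t : List α) (v : α) :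
    (A ++ x :: t).set A.length v = A ++ v :: t := by
  induction A with
  | nil => simp
  | cons a A ih => simp [ih]

theorem getD_append_cons {α : Type} (A : List α) (x : α) (t : List α) (d : α) :
    (A ++ x :: t).getD A.length d = x := by
  induction A with
  | nil => simp
  | cons a A ih => simp

theorem inner_mat (pad : ℤ) (val : ℕ → Int) (k : ℕ) :
    ∀ (js : List ℕ) (m : List (List Int)), k < m.length →
    js.foldl (fun m' (j : ℕ) =>
        match PySem.List.pyGet? m' (k : ℤ) with
        | some row => pySet m' (k : ℤ) (pySet row ((j : ℤ) + pad) (val j))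
        | none => m') m
    = m.set k (js.foldl (fun r (j : ℕ) => pySet r ((j : ℤ) + pad) (val j)) (m.getD k [])) := by
  intro js
  induction js with
  | nil =>
      intro m hk
      simp [List.getElem?_eq_getElem hk, List.set_getElem_self]
  | cons j js ih =>
      intro m hk
      have hget : PySem.List.pyGet? m (k : ℤ) = some m[k] := by
        simp [PySem.List.pyGet?_natCast, List.getElem?_eq_getElem hk]
      simp only [List.foldl_cons, hget]
      rw [pySet_natCast _ _ _ hk, ih _ (by simpa using hk)]
      simp [hk, List.set_set]

theorem rowfold (pad : ℤ) (pn : ℕ) (hpad : pad = (pn : ℤ)) (g : ℕ → Int) :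
    ∀ (n : ℕ) (tail : List Int),
    (List.range n).foldl (fun r (j : ℕ) => pySet r ((j : ℤ) + pad) (g j))
        (List.replicate pn (0 : Int) ++ List.replicate n (0 : Int) ++ tail)
    = List.replicate pn (0 : Int) ++ (List.range n).map g ++ tail := by
  intro n
  induction n with
  | zero => intro tail; simp
  | succ n ih =>
      intro tail
      rw [List.range_succ, List.foldl_append]
      have hsplit : List.replicate pn (0 : Int) ++ List.replicate (n + 1) (0 : Int) ++ tail
          = List.replicate pn (0 : Int) ++ List.replicate n (0 : Int) ++ ((0 : Int) :: tail) := by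
        rw [List.replicate_succ']; simp only [List.append_assoc, List.singleton_append]
      rw [hsplit, ih ((0 : Int) :: tail)]
      have hidx : ((n : ℤ) + pad) = ((pn + n : ℕ) : ℤ) := by push_cast [hpad]; ring
      have hlen : pn + n = (List.replicate pn (0 : Int) ++ (List.range n).map g).length := by
        simp
      simp only [List.foldl_cons, List.foldl_nil, hidx]
      rw [pySet_natCast _ _ _ (by
        simp only [List.length_append, List.length_replicate, List.length_map,
          List.length_range, List.length_cons]
        omega)]
      rw [hlen, set_append_cons]
      simp

theorem outer (pad : ℤ) (pn wn : ℕ) (hpad : pad = (pn : ℤ)) (val : ℕ → ℕ → Int) (zr : List Int) :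
    ∀ (n : ℕ) (tail : List (List Int)),
    (List.range n).foldl (fun m (i : ℕ) =>
        (List.range wn).foldl (fun m' (j : ℕ) =>
          match PySem.List.pyGet? m' ((i : ℤ) + pad) with
          | some row => pySet m' ((i : ℤ) + pad) (pySet row ((j : ℤ) + pad) (val i j))
          | none => m') m)
      (List.replicate pn zr ++ List.replicate n zr ++ tail)
    = List.replicate pn zr
        ++ (List.range n).map (fun i => (List.range wn).foldl (fun r (j : ℕ) => pySet r ((j : ℤ) + pad) (val i j)) zr)
        ++ tail := by
  intro n
  induction n with
  | zero => intro tail; simp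
  | succ n ih =>
      intro tail
      rw [List.range_succ, List.foldl_append]
      have hsplit : List.replicate pn zr ++ List.replicate (n + 1) zr ++ tail
          = List.replicate pn zr ++ List.replicate n zr ++ (zr :: tail) := by
        rw [List.replicate_succ']; simp only [List.append_assoc, List.singleton_append]
      rw [hsplit, ih (zr :: tail)]
      have hidx : ((n : ℤ) + pad) = ((pn + n : ℕ) : ℤ) := by push_cast [hpad]; ring
      have hlen : pn + n = (List.replicate pn zr
          ++ (List.range n).map (fun i => (List.range wn).foldl (fun r (j : ℕ) => pySet r ((j : ℤ) + pad) (val i j)) zr)).length := by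
        simp
      simp only [List.foldl_cons, List.foldl_nil, hidx]
      rw [inner_mat pad (val n) (pn + n) (List.range wn) _ (by
        simp only [List.length_append, List.length_replicate, List.length_map,
          List.length_range, List.length_cons]
        omega)]
      have hgetD := getD_append_cons (List.replicate pn zr
          ++ (List.range n).map (fun i => (List.range wn).foldl (fun r (j : ℕ) => pySet r ((j : ℤ) + pad) (val i j)) zr)) zr tail ([] : List Int)
      rw [hlen, hgetD, set_append_cons]
      simp

theorem map_range_getD_take (row : List Int) : ∀ (wn : ℕ), wn ≤ row.length →
    (List.range wn).map (fun j => (row[j]?).getD 0) = row.take wn := by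
  intro wn
  induction wn with
  | zero => intro _; simp
  | succ n ih =>
      intro h
      have hn : n < row.length := Nat.lt_of_succ_le h
      rw [List.range_succ, List.map_append, ih (by omega),
        List.take_succ_eq_append_getElem hn]
      simp [List.getElem?_eq_getElem hn]

theorem map_range_getElem_eq_map (l : List (List Int)) (f : List Int → List Int) :
    (List.range l.length).map (fun i => f ((l[i]?).getD [])) = l.map f := by
  apply List.ext_getElem
  · simp
  · intro i h1 h2
    simp at h1 ⊢
    simp [List.getElem?_eq_getElem (show i < l.length by simpa using h1)]

theorem main_eq (r0 : List Int) (rest : List (List Int)) (pn : ℕ)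
    (hrows : ∀ row ∈ (r0 :: rest), r0.length ≤ row.length) :
    pad_image_zero_py (r0 :: rest) (pn : ℤ) = pad_image_zero_py_alt (r0 :: rest) (pn : ℤ) := by
  have e1 : (((r0 :: rest).length : ℤ)) + 2 * (pn : ℤ) = ((rest.length + 1 + 2 * pn : ℕ) : ℤ) := by
    push_cast [List.length_cons]; ring
  have e2 : ((r0.length : ℤ)) + 2 * (pn : ℤ) = ((r0.length + 2 * pn : ℕ) : ℤ) := by
    push_cast; ring
  simp only [pad_image_zero_py, pad_image_zero_py_alt, PySem.List.pyGet?_zero_cons]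
  rw [e1, e2]
  simp only [PySem.List.pyRange_zero_natCast, List.foldl_map, List.map_map,
    Function.comp_def, List.map_const', List.length_range,
    PySem.List.pyRepeat_singleton, Int.toNat_natCast,
    PySem.List.slice_to_natCast, List.map_id']
  have hsp : rest.length + 1 + 2 * pn = pn + (rest.length + 1) + pn := by omega
  rw [hsp, List.replicate_add, List.replicate_add]
  rw [show (r0 :: rest).length = rest.length + 1 from rfl]
  rw [outer ((pn : ℤ)) pn r0.length rfl
    (fun i j => ((PySem.List.pyGet? (r0 :: rest) (i : ℤ)).bind fun r => PySem.List.pyGet? r (j : ℤ)).getD 0)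
    (List.replicate (r0.length + 2 * pn) 0) (rest.length + 1)
    (List.replicate pn (List.replicate (r0.length + 2 * pn) 0))]
  have hG : ∀ i ∈ List.range (rest.length + 1),
      (List.range r0.length).foldl
        (fun r (j : ℕ) => pySet r ((j : ℤ) + (pn : ℤ))
          (((PySem.List.pyGet? (r0 :: rest) (i : ℤ)).bind fun r => PySem.List.pyGet? r (j : ℤ)).getD 0))
        (List.replicate (r0.length + 2 * pn) 0)
      = List.replicate pn 0 ++ (((r0 :: rest)[i]?).getD []).take r0.length ++ List.replicate pn 0 := by
    intro i hi
    rw [List.mem_range] at hi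
    have hi' : i < (r0 :: rest).length := by simpa using hi
    have hrow : ((r0 :: rest)[i]?).getD [] = (r0 :: rest)[i] := by
      simp [List.getElem?_eq_getElem hi']
    have hlenrow : r0.length ≤ (r0 :: rest)[i].length :=
      hrows _ (List.getElem_mem hi')
    have hval : ∀ j ∈ List.range r0.length,
        (((PySem.List.pyGet? (r0 :: rest) (i : ℤ)).bind fun r => PySem.List.pyGet? r (j : ℤ)).getD 0)
        = (((r0 :: rest)[i][j]?).getD 0) := by
      intro j hj
      rw [PySem.List.pyGet?_natCast, List.getElem?_eq_getElem hi']
      simp [PySem.List.pyGet?_natCast]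
    have hsp2 : r0.length + 2 * pn = pn + r0.length + pn := by omega
    rw [hsp2, List.replicate_add, List.replicate_add]
    rw [PySem.List.foldl_congr_mem' (List.range r0.length) _
      (fun r (j : ℕ) => pySet r ((j : ℤ) + (pn : ℤ)) (((r0 :: rest)[i][j]?).getD 0)) _
      (by intro j hj acc; rw [hval j hj])]
    rw [rowfold ((pn : ℤ)) pn rfl (fun j => (((r0 :: rest)[i][j]?).getD 0)) r0.length (List.replicate pn 0)]
    rw [map_range_getD_take _ _ hlenrow, hrow]
  rw [List.map_congr_left hG]
  rw [show rest.length + 1 = (r0 :: rest).length from rfl,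
    map_range_getElem_eq_map (r0 :: rest)
      (fun row => List.replicate pn 0 ++ row.take r0.length ++ List.replicate pn 0)]
  simp [List.append_assoc]

-- ===== VERDICT (by name: the statement is the Claim_ definition above) =====
theorem pad_image_zero_py_spec : Claim_equal_pad_image_zero_py := by
  intro image pad _ hpre
  obtain ⟨hne, hpos, hrows⟩ := hpre
  unfold Spec_pad_image_zero_py
  match image, hne with
  | r0 :: rest, _ =>
    obtain ⟨pn, rfl⟩ : ∃ pn : ℕ, pad = (pn : ℤ) := ⟨pad.toNat, (Int.toNat_of_nonneg hpos).symm⟩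
    exact main_eq r0 rest pn (by simpa using hrows)
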